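-- pv_equiv track=rewrite | github.com/HugoLckr/Python_distroless_image_with_docker_to_gcp | src/bazel_generate_files/generate_files.py | get_new_path_to_requirement
-- ===== SOURCE A (Python) =====
-- def get_new_path_to_requirement(older_path_to_requirement, new_path):
--     divised_path = older_path_to_requirement.split('/')
--     divised_path = divised_path[:-1]
--     divised_path.append(new_path)
--     new_path_to_requirement=""
--     for i in divised_path:
--         new_path_to_requirement += i+'/'
--     new_path_to_requirement = new_path_to_requirement[:-1]
--     new_path_to_requirement = new_path_to_requirement[:-1] if (new_path_to_requirement[-1:] == '\n') else new_path_to_requirement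
--     return new_path_to_requirement
-- ===== SOURCE B (Python) =====
-- def get_new_path_to_requirement(older_path_to_requirement, new_path):
--     # Scan backwards for the last '/'; keep everything up to and including it.
--     i = len(older_path_to_requirement)
--     while i > 0 and older_path_to_requirement[i - 1] != '/':
--         i -= 1
--     result = older_path_to_requirement[:i] + new_path
--     if result.endswith('\n'):
--         result = result[:-1]
--     return result
-- ===== Notes on version B (the rewrite author's own statement) =====
-- stated objective: simpler
-- what changed: B drops A's split-into-list / rebuild-with-a-join-loop approach: it scans backwards for the last '/' and returns the prefix slice up to and including it plus new_path (then the same trailing-newline trim), with no list and no join loop.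
import Mathlib
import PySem

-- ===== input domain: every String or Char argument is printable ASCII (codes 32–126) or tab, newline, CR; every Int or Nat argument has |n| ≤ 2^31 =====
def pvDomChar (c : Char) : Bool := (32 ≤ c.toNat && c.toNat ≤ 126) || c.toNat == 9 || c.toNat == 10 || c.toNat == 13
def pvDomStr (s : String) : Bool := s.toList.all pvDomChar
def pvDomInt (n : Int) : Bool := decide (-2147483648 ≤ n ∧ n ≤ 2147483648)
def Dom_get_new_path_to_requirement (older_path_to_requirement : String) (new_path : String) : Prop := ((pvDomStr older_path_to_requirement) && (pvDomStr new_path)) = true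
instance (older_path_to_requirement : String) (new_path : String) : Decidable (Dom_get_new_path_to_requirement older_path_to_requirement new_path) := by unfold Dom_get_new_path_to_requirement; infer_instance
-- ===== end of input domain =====

-- B replaces A's split-into-list / join-loop rebuild by a backward scan for the last '/'
-- plus one prefix slice (objective: simpler).

-- ===== PORT A =====
def get_new_path_to_requirement (older_path_to_requirement : String) (new_path : String) : String :=
  -- older.split('/'): the separator "/" is nonempty, so split is PySem.Chars.splitOn (split? = some of it)
  let divised := PySem.Chars.splitOn older_path_to_requirement.toList ['/']
  let divised := PySem.List.slice divised none (some (-1))          -- divised_path = divised_path[:-1]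
  let divised := divised ++ [new_path.toList]                       -- divised_path.append(new_path)
  let r := divised.foldl (fun acc i => acc ++ i ++ ['/']) []        -- new_path_to_requirement += i + '/'
  let r := PySem.List.slice r none (some (-1))                      -- = new_path_to_requirement[:-1]
  let r := if PySem.List.slice r (some (-1)) none == ['\n']         -- if new_path_to_requirement[-1:] == '\n'
           then PySem.List.slice r none (some (-1)) else r
  String.ofList r

-- ===== PORT B =====
-- while i > 0 and older[i-1] != '/': i -= 1   (the index i-1 is always in range; getD's default is never read)
def pvAltGo (cs : List Char) : Nat → Nat
  | 0 => 0
  | i + 1 => if cs.getD i ' ' != '/' then pvAltGo cs i else i + 1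

def get_new_path_to_requirement_alt (older_path_to_requirement : String) (new_path : String) : String :=
  let cs := older_path_to_requirement.toList
  let i := pvAltGo cs cs.length
  let r := PySem.List.slice cs none (some (i : Int)) ++ new_path.toList     -- older[:i] + new_path
  let r := if PySem.Chars.endswith r ['\n']                                 -- result.endswith('\n')
           then PySem.List.slice r none (some (-1)) else r                  -- result[:-1]
  String.ofList r

-- ===== PRECONDITION & SPEC =====
def Spec_get_new_path_to_requirement (older_path_to_requirement : String) (new_path : String) (out : String) : Prop := out = get_new_path_to_requirement_alt older_path_to_requirement new_path
instance (older_path_to_requirement : String) (new_path : String) (out : String) : Decidable (Spec_get_new_path_to_requirement older_path_to_requirement new_path out) := by unfold Spec_get_new_path_to_requirement; infer_instance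

-- ===== CLAIM (what is proved, stated in full; the proofs are below) =====
def Claim_equal_get_new_path_to_requirement : Prop := ∀ (older_path_to_requirement : String) (new_path : String), Dom_get_new_path_to_requirement older_path_to_requirement new_path → Spec_get_new_path_to_requirement older_path_to_requirement new_path (get_new_path_to_requirement older_path_to_requirement new_path)

-- ===== LEMMAS AND PROOFS =====

def pvMySplit : List Char → List (List Char)
  | [] => [[]]
  | c :: rest => if c = '/' then [] :: pvMySplit rest else (pvMySplit rest).modifyHead (c :: ·)
def pvPref : List Char → List Char
  | [] => []
  | c :: rest => if '/' ∈ c :: rest then c :: pvPref rest else []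

theorem pvMySplit_ne_nil (cs : List Char) : pvMySplit cs ≠ [] := by
  induction cs with
  | nil => simp [pvMySplit]
  | cons c rest ih =>
    simp only [pvMySplit]
    split_ifs
    · simp
    · cases h : pvMySplit rest with
      | nil => exact absurd h ih
      | cons p ps => simp [List.modifyHead]

theorem pvMySplit_length (cs : List Char) : (pvMySplit cs).length = cs.count '/' + 1 := by
  induction cs with
  | nil => simp [pvMySplit]
  | cons c rest ih =>
    simp only [pvMySplit]
    split_ifs with h
    · subst h; simp [ih]
    · rw [List.length_modifyHead, ih, List.count_cons]
      simp [h]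

theorem pv_go_spec (fuel : Nat) : ∀ (l cur : List Char) (accs : List (List Char)),
    l.length < fuel →
    PySem.Chars.splitOn.go ['/'] fuel l cur accs =
      accs.reverse ++ (pvMySplit l).modifyHead (cur.reverse ++ ·) := by
  induction fuel with
  | zero => intro l cur accs h; omega
  | succ fuel ih =>
    intro l cur accs h
    cases l with
    | nil => simp [PySem.Chars.splitOn.go, pvMySplit, List.modifyHead]
    | cons c rest =>
      rw [PySem.Chars.splitOn.go]
      by_cases hc : c = '/'
      · subst hc
        simp only [List.isPrefixOf, Bool.and_true, beq_self_eq_true, ite_true]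
        rw [ih _ _ _ (by simpa using Nat.lt_of_succ_lt_succ h)]
        obtain ⟨p, ps, hps⟩ : ∃ p ps, pvMySplit rest = p :: ps := by
          cases hh : pvMySplit rest with
          | nil => exact absurd hh (pvMySplit_ne_nil rest)
          | cons p ps => exact ⟨p, ps, rfl⟩
        simp [pvMySplit, hps, List.modifyHead]
      · have hb : (('/' : Char) == c) = false := by
          simp only [beq_eq_false_iff_ne, ne_eq]
          exact fun hh => hc hh.symm
        simp only [List.isPrefixOf, Bool.and_true, hb, Bool.false_eq_true, ite_false]
        rw [ih _ _ _ (by simpa using Nat.lt_of_succ_lt_succ h)]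
        simp only [pvMySplit, hc, ite_false]
        cases pvMySplit rest <;> simp [List.modifyHead, List.append_assoc]

theorem pv_splitOn_eq (cs : List Char) : PySem.Chars.splitOn cs ['/'] = pvMySplit cs := by
  rw [PySem.Chars.splitOn, pv_go_spec _ _ _ _ (by omega)]
  cases pvMySplit cs <;> simp [List.modifyHead]

theorem pv_flatMap_dropLast (cs : List Char) :
    ((pvMySplit cs).dropLast).flatMap (· ++ ['/']) = pvPref cs := by
  induction cs with
  | nil => simp [pvMySplit, pvPref]
  | cons c rest ih =>
    by_cases hc : c = '/'
    · subst hc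
      simp only [pvMySplit, ite_true, pvPref, List.mem_cons, true_or, if_true]
      rw [List.dropLast_cons_of_ne_nil (pvMySplit_ne_nil rest)]
      simp [ih]
    · obtain ⟨p, ps, hps⟩ : ∃ p ps, pvMySplit rest = p :: ps := by
        cases h : pvMySplit rest with
        | nil => exact absurd h (pvMySplit_ne_nil rest)
        | cons p ps => exact ⟨p, ps, rfl⟩
      have hc' : ¬ ('/' : Char) = c := fun hh => hc hh.symm
      by_cases hm : '/' ∈ rest
      · have hps' : ps ≠ [] := by
          have hl := pvMySplit_length rest
          rw [hps] at hl
          have hcnt : rest.count '/' ≠ 0 := by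
            simpa [List.count_eq_zero] using hm
          intro he; subst he; simp at hl; omega
        simp only [pvMySplit, hc, ite_false, hps, List.modifyHead]
        rw [List.dropLast_cons_of_ne_nil hps']
        rw [hps, List.dropLast_cons_of_ne_nil hps'] at ih
        simp only [List.flatMap_cons] at ih ⊢
        simp only [pvPref, List.mem_cons, hm, or_true, if_true]
        rw [← ih]
        simp
      · have hps' : ps = [] := by
          have hl := pvMySplit_length rest
          rw [hps] at hl
          have hcnt : rest.count '/' = 0 := by
            simpa [List.count_eq_zero] using hm
          rw [hcnt] at hl; simp at hl
          exact hl
        subst hps'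
        simp [pvMySplit, hc, hps, List.modifyHead, pvPref, hm, hc']

theorem pv_pref_eq (cs : List Char) :
    pvPref cs = (cs.reverse.dropWhile (· != '/')).reverse := by
  induction cs with
  | nil => simp [pvPref]
  | cons c rest ih =>
    simp only [pvPref, List.reverse_cons, List.dropWhile_append]
    by_cases hm : '/' ∈ rest
    · have hne : ¬ (rest.reverse.dropWhile (· != '/')).isEmpty = true := by
        simp only [List.isEmpty_iff, List.dropWhile_eq_nil_iff]
        exact fun hall => by simpa using hall '/' (by simpa using hm)
      simp only [List.mem_cons, hm, or_true, if_true, hne, ite_false]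
      simp [ih]
    · have hnil : rest.reverse.dropWhile (· != '/') = [] := by
        rw [List.dropWhile_eq_nil_iff]
        intro x hx
        simp only [bne_iff_ne, ne_eq]
        rintro rfl
        exact hm (by simpa using hx)
      by_cases hc : c = '/'
      · subst hc
        simp [hnil, ih, pvPref, hm, List.mem_cons]
      · have hmem : ¬ '/' ∈ c :: rest := by
          simp only [List.mem_cons]
          rintro (hh | hh)
          · exact hc hh.symm
          · exact hm hh
        simp [hnil, hmem, hc]

theorem pv_altGo_spec (cs : List Char) : ∀ n, n ≤ cs.length →
    pvAltGo cs n = n - ((cs.take n).reverse.takeWhile (· != '/')).length := by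
  intro n
  induction n with
  | zero => intro _; simp [pvAltGo]
  | succ n ih =>
    intro hn
    have hn' : n < cs.length := by omega
    have hget : cs.getD n ' ' = cs[n] := by
      simp [List.getD_eq_getElem?_getD, List.getElem?_eq_getElem hn']
    have htake : cs.take (n + 1) = cs.take n ++ [cs[n]] := by
      rw [List.take_succ, List.getElem?_eq_getElem hn']
      rfl
    have hklen : ((cs.take n).reverse.takeWhile (· != '/')).length ≤ n := by
      have hp := (List.takeWhile_prefix (l := (cs.take n).reverse) (p := (· != '/'))).length_le
      simp only [List.length_reverse, List.length_take] at hp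
      omega
    simp only [pvAltGo, hget, htake, List.reverse_append, List.reverse_cons, List.reverse_nil,
      List.nil_append, List.cons_append, List.takeWhile_cons]
    by_cases hsl : cs[n] = '/'
    · simp [hsl]
    · have : (cs[n] != '/') = true := by simpa using hsl
      simp only [this, ite_true]
      rw [ih (by omega)]
      simp only [List.length_cons]
      omega

theorem pv_dropWhile_eq_drop {α : Type} (p : α → Bool) (l : List α) :
    l.dropWhile p = l.drop (l.takeWhile p).length := by
  induction l with
  | nil => simp
  | cons a l ih =>
    by_cases hp : p a <;> simp [List.takeWhile_cons, List.dropWhile_cons, hp, ih]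

theorem pv_take_altGo (cs : List Char) :
    cs.take (pvAltGo cs cs.length) = pvPref cs := by
  rw [pv_pref_eq, pv_altGo_spec cs cs.length le_rfl]
  rw [List.take_length]
  rw [pv_dropWhile_eq_drop]
  rw [List.reverse_drop]
  simp

theorem pv_last_slice_eq_endswith (r : List Char) :
    (PySem.List.slice r (some (-1)) none == [('\n' : Char)]) = PySem.Chars.endswith r ['\n'] := by
  rw [PySem.List.slice_from_neg_one]
  rcases List.eq_nil_or_concat r with rfl | ⟨l, x, rfl⟩
  · simp [PySem.Chars.endswith]
  · simp only [List.concat_eq_append]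
    rw [Bool.eq_iff_iff]
    constructor
    · intro hb
      have hdrop : (l ++ [x]).drop ((l ++ [x]).length - 1) = [x] := by
        simp [List.drop_left]
      rw [hdrop] at hb
      have hx : x = '\n' := by simpa using hb
      subst hx
      rw [PySem.Chars.endswith_iff]
      exact ⟨l, rfl⟩
    · intro hb
      rw [PySem.Chars.endswith_iff] at hb
      obtain ⟨t, ht⟩ := hb
      have hx : x = '\n' := by
        have h2 := congrArg List.getLast? ht
        have h3 : '\n' = x := by simpa using h2
        exact h3.symm
      subst hx
      simp [List.drop_left]

theorem get_new_path_to_requirement_spec : Claim_equal_get_new_path_to_requirement := by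
  intro older np _
  unfold Spec_get_new_path_to_requirement
  have hfn : (fun (acc i : List Char) => acc ++ i ++ ['/']) = (fun acc i => acc ++ (i ++ ['/'])) := by
    funext a b; rw [List.append_assoc]
  simp only [get_new_path_to_requirement, get_new_path_to_requirement_alt, pv_splitOn_eq,
    PySem.List.slice_to_neg_one, hfn, PySem.List.foldl_append_eq_flatMap, List.nil_append,
    List.flatMap_append, pv_flatMap_dropLast, List.flatMap_cons, List.flatMap_nil,
    List.append_nil, ← List.append_assoc, List.dropLast_concat,
    PySem.List.slice_to_natCast, pv_take_altGo, pv_last_slice_eq_endswith]
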